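-- pv_equiv track=rewrite | github.com/yash008-VHPL/knm-vending | app.py | split_tour_equally
-- ===== SOURCE A (Python) =====
-- def split_tour_equally(tour, k):
--     """
--     Split an ordered tour into k consecutive segments of as-equal size as possible.
--     Returns a list of k non-empty lists.
--     """
--     n = len(tour)
--     segments, idx = [], 0
--     for i in range(k):
--         size = (n - idx) // (k - i)   # distribute remainder evenly
--         if size > 0:
--             segments.append(tour[idx:idx + size])
--             idx += size
--     return segments
-- ===== SOURCE B (Python) =====
-- def split_tour_equally(tour, k):
--     """
--     Split an ordered tour into k consecutive segments of as-equal size as possible.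
--     Closed form: with q, r = divmod(n, k), the greedy layout is k-r segments of
--     size q followed by r segments of size q+1; empty segments (q == 0) are skipped.
--     """
--     if k <= 0:
--         return []
--     n = len(tour)
--     q, r = divmod(n, k)
--     m = k - r
--     head = [tour[i * q:(i + 1) * q] for i in range(m)] if q > 0 else []
--     off = m * q
--     return head + [tour[off + j * (q + 1):off + (j + 1) * (q + 1)] for j in range(r)]
-- ===== Notes on version B (the rewrite author's own statement) =====
-- stated objective: alternative
-- what changed: Replaced the running-index loop that recomputes (n-idx)//(k-i) every iteration with a single divmod(n,k) and closed-form slice boundaries: k-r segments of size q followed by r segments of size q+1.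
import Mathlib
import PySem

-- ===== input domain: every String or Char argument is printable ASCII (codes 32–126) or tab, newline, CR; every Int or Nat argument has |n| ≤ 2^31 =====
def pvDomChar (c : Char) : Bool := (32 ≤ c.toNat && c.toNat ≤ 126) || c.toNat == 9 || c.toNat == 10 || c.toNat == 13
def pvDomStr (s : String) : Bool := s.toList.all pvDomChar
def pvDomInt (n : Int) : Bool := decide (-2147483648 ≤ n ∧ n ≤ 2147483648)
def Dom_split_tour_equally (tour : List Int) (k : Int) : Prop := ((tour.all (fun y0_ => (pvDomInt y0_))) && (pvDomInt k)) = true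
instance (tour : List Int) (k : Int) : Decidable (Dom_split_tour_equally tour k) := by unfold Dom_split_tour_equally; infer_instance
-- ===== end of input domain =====

-- B replaces A's running-index greedy loop by one divmod and closed-form slice
-- boundaries (k-r segments of size q, then r segments of size q+1); alternative
-- decomposition, same asymptotic cost.


-- ===== PORT A =====
-- literal transliteration of A: for i in range(k): size = (n-idx)//(k-i); if size>0: append tour[idx:idx+size]; idx += size
def split_tour_equally (tour : List Int) (k : Int) : List (List Int) :=
  let n : Int := (tour.length : Int)
  ((PySem.List.pyRange 0 k 1).foldl
    (fun (st : List (List Int) × Int) (i : Int) =>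
      let size := PySem.Int.floordiv (n - st.2) (k - i)
      if 0 < size then
        (st.1 ++ [PySem.List.slice tour (some st.2) (some (st.2 + size))], st.2 + size)
      else st)
    ([], 0)).1

-- ===== PORT B =====
-- literal transliteration of Source B: q, r = divmod(n, k); head slices of size q, tail slices of size q+1
def split_tour_equally_alt (tour : List Int) (k : Int) : List (List Int) :=
  if k ≤ 0 then []
  else
    let n : Int := (tour.length : Int)
    let q := PySem.Int.floordiv n k
    let r := PySem.Int.mod n k
    let m := k - r
    let head := if 0 < q then
        (PySem.List.pyRange 0 m 1).map
          (fun i => PySem.List.slice tour (some (i * q)) (some ((i + 1) * q)))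
      else []
    let off := m * q
    head ++ (PySem.List.pyRange 0 r 1).map
      (fun j => PySem.List.slice tour (some (off + j * (q + 1))) (some (off + (j + 1) * (q + 1))))

-- ===== PRECONDITION & SPEC =====
def Spec_split_tour_equally (tour : List Int) (k : Int) (out : List (List Int)) : Prop := out = split_tour_equally_alt tour k
instance (tour : List Int) (k : Int) (out : List (List Int)) : Decidable (Spec_split_tour_equally tour k out) := by unfold Spec_split_tour_equally; infer_instance

-- ===== CLAIM (what is proved, stated in full; the proofs are below) =====
def Claim_equal_split_tour_equally : Prop := ∀ (tour : List Int) (k : Int), Dom_split_tour_equally tour k → Spec_split_tour_equally tour k (split_tour_equally tour k)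

-- ===== LEMMAS AND PROOFS =====

-- greedy segment sizes for d remaining steps over m remaining elements
def gsizes : Nat → Nat → List Nat
  | 0, _ => []
  | (d+1), m => List.replicate ((d+1) - m % (d+1)) (m / (d+1)) ++ List.replicate (m % (d+1)) (m / (d+1) + 1)

def posSizes (d m : Nat) : List Nat := (gsizes d m).filter (fun s => 0 < s)

-- lay segments of the given sizes consecutively starting at idx
def pplace (tour : List Int) : Nat → List Nat → List (List Int)
  | _, [] => []
  | idx, s :: ss => (tour.drop idx).take s :: pplace tour (idx + s) ss

theorem gsizes_step (d m : Nat) (hd : 0 < d) (hq : 0 < m / d) :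
    gsizes d m = m / d :: gsizes (d - 1) (m - m / d) := by
  match d, hd with
  | 1, _ => simp [gsizes, Nat.mod_one, Nat.div_one]
  | (e+2), _ =>
    have hr : m % (e+2) < e+2 := Nat.mod_lt _ (by omega)
    have hdm := Nat.div_add_mod m (e+2)
    have hexp : (e+2) * (m / (e+2)) = (e+1) * (m / (e+2)) + m / (e+2) := by ring
    have hm : m - m / (e+2) = m % (e+2) + (e+1) * (m / (e+2)) := by
      rw [hexp] at hdm; omega
    rcases Nat.lt_or_ge (m % (e+2)) (e+1) with hlt | hge
    · have hdiv : (m - m / (e+2)) / (e+1) = m / (e+2) := by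
        rw [hm, Nat.add_mul_div_left _ _ (by omega : 0 < e+1), Nat.div_eq_of_lt hlt]
        omega
      have hmod : (m - m / (e+2)) % (e+1) = m % (e+2) := by
        rw [hm, Nat.add_mul_mod_self_left, Nat.mod_eq_of_lt hlt]
      show gsizes (e+2) m = m / (e+2) :: gsizes (e+1) (m - m / (e+2))
      rw [gsizes, gsizes, hdiv, hmod]
      rw [show (e+2) - m % (e+2) = ((e+1) - m % (e+2)) + 1 by omega]
      rw [List.replicate_succ]
      simp
    · have heq : m % (e+2) = e+1 := by omega
      have hm2 : m - m / (e+2) = (e+1) * (m / (e+2) + 1) := by rw [hm, heq]; ring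
      have hdiv : (m - m / (e+2)) / (e+1) = m / (e+2) + 1 := by
        rw [hm2, Nat.mul_div_cancel_left _ (by omega : 0 < e+1)]
      have hmod : (m - m / (e+2)) % (e+1) = 0 := by
        rw [hm2, Nat.mul_mod_right]
      show gsizes (e+2) m = m / (e+2) :: gsizes (e+1) (m - m / (e+2))
      rw [gsizes, gsizes, hdiv, hmod, heq]
      simp [List.replicate_succ]

theorem posSizes_step_pos (d m : Nat) (hd : 0 < d) (hq : 0 < m / d) :
    posSizes d m = m / d :: posSizes (d - 1) (m - m / d) := by
  rw [posSizes, gsizes_step d m hd hq, List.filter_cons]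
  simp [posSizes, hq]

theorem posSizes_step_zero (d m : Nat) (hd : 0 < d) (hq : m / d = 0) :
    posSizes d m = posSizes (d - 1) m := by
  have hlt : m < d := (Nat.div_eq_zero_iff_lt hd).mp hq
  have hmod : m % d = m := Nat.mod_eq_of_lt hlt
  match d, hd, hlt, hmod with
  | 1, _, hlt, _ =>
    interval_cases m
    simp [posSizes, gsizes]
  | (f+2), _, hlt, _ =>
    rcases Nat.lt_or_ge m (f+1) with h2 | h2
    · show posSizes (f+2) m = posSizes (f+1) m
      rw [posSizes, posSizes, gsizes, gsizes]
      rw [Nat.mod_eq_of_lt hlt, Nat.mod_eq_of_lt (by omega), hq,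
        Nat.div_eq_of_lt (by omega)]
      simp [List.filter_append]
    · have heq : m = f+1 := by omega
      subst heq
      show posSizes (f+2) (f+1) = posSizes (f+1) (f+1)
      rw [posSizes, posSizes, gsizes, gsizes]
      rw [Nat.mod_eq_of_lt hlt, Nat.mod_self, Nat.div_self (by omega), hq]
      simp

theorem pplace_append (tour : List Int) (idx : Nat) (ss ts : List Nat) :
    pplace tour idx (ss ++ ts) = pplace tour idx ss ++ pplace tour (idx + ss.sum) ts := by
  induction ss generalizing idx with
  | nil => simp [pplace]
  | cons s ss ih => simp [pplace, ih, Nat.add_assoc]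

theorem pplace_replicate (tour : List Int) (idx a s : Nat) :
    pplace tour idx (List.replicate a s)
      = (List.range a).map (fun i => (tour.drop (idx + i * s)).take s) := by
  induction a generalizing idx with
  | zero => simp [pplace]
  | succ a ih =>
    rw [List.replicate_succ, List.range_succ_eq_map]
    simp only [pplace, ih, List.map_cons, List.map_map]
    congr 1
    · simp
    · refine List.map_congr_left (fun i _ => ?_)
      simp only [Function.comp_apply]
      congr 2
      simp [Nat.succ_mul]
      ring

-- A's loop, started at step k-d with index idx, appends exactly the greedy layout
theorem loopA (tour : List Int) (k : Int) (d : Nat) :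
    ∀ (idx : Nat) (segs : List (List Int)), idx ≤ tour.length → (d : Int) ≤ k →
    (PySem.List.pyRange (k - d) k 1).foldl
      (fun (st : List (List Int) × Int) (i : Int) =>
        let size := PySem.Int.floordiv ((tour.length : Int) - st.2) (k - i)
        if 0 < size then
          (st.1 ++ [PySem.List.slice tour (some st.2) (some (st.2 + size))], st.2 + size)
        else st)
      (segs, (idx : Int))
    = (segs ++ pplace tour idx (posSizes d (tour.length - idx)),
       (idx : Int) + ((posSizes d (tour.length - idx)).sum : Int)) := by
  induction d with
  | zero =>
    intro idx segs _ _
    rw [PySem.List.pyRange_one_eq_nil (by push_cast; omega)]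
    simp [posSizes, gsizes, pplace]
  | succ d ih =>
    intro idx segs hidx hdk
    have hcons : PySem.List.pyRange (k - ((d+1 : Nat) : Int)) k 1
        = (k - ((d+1 : Nat) : Int)) :: PySem.List.pyRange (k - ((d+1 : Nat) : Int) + 1) k 1 :=
      PySem.List.pyRange_one_cons (by push_cast; omega)
    rw [hcons, List.foldl_cons]
    have hden : k - (k - ((d+1 : Nat) : Int)) = ((d+1 : Nat) : Int) := by ring
    have hnum : (tour.length : Int) - (idx : Int) = ((tour.length - idx : Nat) : Int) := by
      push_cast [hidx]; ring
    simp only [hden, hnum, PySem.Int.floordiv_natCast]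
    by_cases hqpos : 0 < (tour.length - idx) / (d+1)
    · rw [if_pos (by exact_mod_cast hqpos)]
      rw [PySem.List.slice_natCast_add]
      rw [show ((idx : Int) + ((tour.length - idx) / (d+1) : Nat)) = ((idx + (tour.length - idx) / (d+1) : Nat) : Int) by push_cast; ring]
      rw [show k - ((d+1 : Nat) : Int) + 1 = k - ((d : Nat) : Int) by push_cast; ring]
      have hqm : (tour.length - idx) / (d+1) ≤ tour.length - idx := Nat.div_le_self _ _
      have ih' := ih (idx + (tour.length - idx) / (d+1))
        (segs ++ [(tour.drop idx).take ((tour.length - idx) / (d+1))])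
        (by omega) (by push_cast at hdk ⊢; omega)
      simp only [] at ih'
      rw [ih']
      have hrest : tour.length - (idx + (tour.length - idx) / (d+1))
          = (tour.length - idx) - (tour.length - idx) / (d+1) := by omega
      rw [hrest, posSizes_step_pos (d+1) (tour.length - idx) (by omega) hqpos, pplace]
      simp only [Nat.add_sub_cancel]
      congr 1
      · simp
      · simp only [List.sum_cons]
        push_cast
        ring
    · rw [if_neg (show ¬((0:Int) < (((tour.length - idx) / (d+1) : Nat) : Int)) by exact_mod_cast hqpos)]
      rw [show k - ((d+1 : Nat) : Int) + 1 = k - ((d : Nat) : Int) by push_cast; ring]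
      have ih' := ih idx segs hidx (by push_cast at hdk ⊢; omega)
      simp only [] at ih'
      rw [ih']
      rw [posSizes_step_zero (d+1) (tour.length - idx) (by omega) (Nat.eq_zero_of_not_pos hqpos)]
      simp

theorem altB (tour : List Int) (K : Nat) (hK : 0 < K) :
    split_tour_equally_alt tour (K : Int) = pplace tour 0 (posSizes K tour.length) := by
  obtain ⟨e, rfl⟩ : ∃ e, K = e + 1 := ⟨K - 1, by omega⟩
  rw [split_tour_equally_alt, if_neg (by push_cast; omega)]
  simp only [PySem.Int.floordiv_natCast, PySem.Int.mod_natCast]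
  have hrK : tour.length % (e+1) < e+1 := Nat.mod_lt _ (by omega)
  have hm : ((e+1 : Nat) : Int) - ((tour.length % (e+1) : Nat) : Int)
      = (((e+1) - tour.length % (e+1) : Nat) : Int) := (Int.natCast_sub hrK.le).symm
  rw [hm, PySem.List.pyRange_zero_nat, PySem.List.pyRange_zero_nat, List.map_map, List.map_map]
  by_cases hq : 0 < tour.length / (e+1)
  · rw [if_pos (by exact_mod_cast hq)]
    have hsizes : posSizes (e+1) tour.length
        = List.replicate ((e+1) - tour.length % (e+1)) (tour.length / (e+1))
          ++ List.replicate (tour.length % (e+1)) (tour.length / (e+1) + 1) := by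
      rw [posSizes, gsizes, List.filter_append, List.filter_replicate, List.filter_replicate]
      simp [hq]
    rw [hsizes, pplace_append, pplace_replicate, pplace_replicate]
    congr 1
    · refine List.map_congr_left (fun i _ => ?_)
      simp only [Function.comp_apply]
      rw [show ((i : Int) + 1) * ((tour.length / (e+1) : Nat) : Int)
            = ((i * (tour.length / (e+1)) : Nat) : Int) + ((tour.length / (e+1) : Nat) : Int)
          by push_cast; ring]
      rw [show ((i : Int)) * ((tour.length / (e+1) : Nat) : Int)
            = ((i * (tour.length / (e+1)) : Nat) : Int) by push_cast; ring]
      rw [PySem.List.slice_natCast_add]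
      simp
    · refine List.map_congr_left (fun j _ => ?_)
      simp only [Function.comp_apply]
      rw [List.sum_replicate, smul_eq_mul]
      rw [show (((e+1) - tour.length % (e+1) : Nat) : Int) * ((tour.length / (e+1) : Nat) : Int)
              + ((j : Int) + 1) * (((tour.length / (e+1) : Nat) : Int) + 1)
            = ((((e+1) - tour.length % (e+1)) * (tour.length / (e+1))
                + j * (tour.length / (e+1) + 1) : Nat) : Int)
              + ((tour.length / (e+1) + 1 : Nat) : Int) by push_cast; ring]
      rw [show (((e+1) - tour.length % (e+1) : Nat) : Int) * ((tour.length / (e+1) : Nat) : Int)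
              + ((j : Int)) * (((tour.length / (e+1) : Nat) : Int) + 1)
            = ((((e+1) - tour.length % (e+1)) * (tour.length / (e+1))
                + j * (tour.length / (e+1) + 1) : Nat) : Int) by push_cast; ring]
      rw [PySem.List.slice_natCast_add]
      simp
  · have hq0 : tour.length / (e+1) = 0 := Nat.eq_zero_of_not_pos hq
    have hlt : tour.length < e+1 := Nat.lt_of_div_eq_zero (by omega) hq0
    have hmod : tour.length % (e+1) = tour.length := Nat.mod_eq_of_lt hlt
    rw [hq0, if_neg (by simp)]
    have hsizes : posSizes (e+1) tour.length = List.replicate tour.length 1 := by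
      rw [posSizes, gsizes, hmod, hq0, List.filter_append, List.filter_replicate,
        List.filter_replicate]
      simp
    rw [hsizes, pplace_replicate]
    simp only [List.nil_append, hmod]
    refine List.map_congr_left (fun j _ => ?_)
    simp only [Function.comp_apply]
    rw [show (((e+1) - tour.length : Nat) : Int) * ((0 : Nat) : Int) + ((j : Int)) * (((0:Nat) : Int) + 1)
          = ((j * 1 : Nat) : Int) by push_cast; ring]
    rw [show (((e+1) - tour.length : Nat) : Int) * ((0 : Nat) : Int) + ((j : Int) + 1) * (((0:Nat) : Int) + 1)
          = ((j * 1 : Nat) : Int) + ((1 : Nat) : Int) by push_cast; ring]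
    rw [PySem.List.slice_natCast_add]
    simp

-- ===== VERDICT (by name: the statement is the Claim_ definition above) =====
theorem split_tour_equally_spec : Claim_equal_split_tour_equally := by
  intro tour k _
  unfold Spec_split_tour_equally
  by_cases hk : k ≤ 0
  · simp [split_tour_equally, split_tour_equally_alt, hk,
      PySem.List.pyRange_one_eq_nil hk]
  · rw [not_le] at hk
    have hK : k = ((k.toNat : Nat) : Int) := by omega
    have h0 : (0 : Int) = k - (k.toNat : Nat) := by omega
    rw [split_tour_equally]
    rw [show (PySem.List.pyRange 0 k 1) = PySem.List.pyRange (k - (k.toNat : Nat)) k 1 by rw [← h0]]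
    have h := loopA tour k k.toNat 0 [] (by omega) (by omega)
    simp only [Nat.cast_zero] at h
    rw [h]
    simp only [Nat.sub_zero, List.nil_append]
    rw [hK, altB tour k.toNat (by omega)]
    congr 2
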